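-- pv_equiv track=rewrite | github.com/nickthorpe71/100-kata | 35-sequence-length/35-sequence-length.py | repeat_sequence_len
-- ===== SOURCE A (Python) =====
-- from typing import List
--
-- def split_digits(n: int) -> List[int]:
--     curr = n
--     res = []
--     while curr > 0:
--         res.append(curr % 10)
--         curr //= 10
--     return res
--
-- def sum_of_squares(n: int) -> int:
--     return sum([x * x for x in split_digits(n)])
--
-- def repeat_sequence_len(n: int) -> int:
--     index_dict = {}
--     current_res = n
--     i = 0
--
--     while True:
--         new_res = sum_of_squares(current_res)
--
--         if new_res in index_dict:
--             return i - index_dict[new_res]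
--         else:
--             index_dict[new_res] = i;
--
--         current_res = new_res
--         i += 1
-- ===== SOURCE B (Python) =====
-- def repeat_sequence_len(n: int) -> int:
--     def f(m: int) -> int:
--         t = 0
--         while m > 0:
--             m, d = divmod(m, 10)
--             t += d * d
--         return t
--     # Floyd's tortoise-and-hare: find a point on the cycle, then count its period.
--     slow = f(n)
--     fast = f(slow)
--     while slow != fast:
--         slow = f(slow)
--         fast = f(f(fast))
--     length = 1
--     y = f(slow)
--     while y != slow:
--         length += 1
--         y = f(y)
--     return length
-- ===== Notes on version B (the rewrite author's own statement) =====
-- stated objective: alternative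
-- what changed: A detects the cycle with a dictionary mapping each sum-of-squares value to its index and returns the index difference; B uses Floyd's tortoise-and-hare to find a point on the cycle with O(1) extra memory and then walks the cycle once counting its period.
import Mathlib
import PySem

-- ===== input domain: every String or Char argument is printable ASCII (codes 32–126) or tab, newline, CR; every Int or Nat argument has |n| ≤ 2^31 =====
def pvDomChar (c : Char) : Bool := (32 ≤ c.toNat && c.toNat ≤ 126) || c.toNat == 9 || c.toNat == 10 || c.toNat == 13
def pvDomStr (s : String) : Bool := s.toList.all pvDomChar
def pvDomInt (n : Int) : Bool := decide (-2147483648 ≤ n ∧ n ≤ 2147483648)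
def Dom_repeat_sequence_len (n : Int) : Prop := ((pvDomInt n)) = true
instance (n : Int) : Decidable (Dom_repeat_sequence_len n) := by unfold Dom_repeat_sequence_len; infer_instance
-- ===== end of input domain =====

-- B replaces A's index dictionary by Floyd's tortoise-and-hare cycle detection plus a
-- period-counting walk (constant extra memory); return value equivalence only.
-- All 'while' loops are ported with fuel that only makes them total; on Dom inputs the
-- fuel is never exhausted (digit loops need ≤ 10 steps, outer loops ≤ ~250 steps).

-- ===== PORT A =====
-- while curr > 0: res.append(curr % 10); curr //= 10
def splitDigitsLoop (fuel : Nat) (curr : Int) (res : List Int) : List Int :=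
  match fuel with
  | 0 => res
  | fuel + 1 =>
    if curr > 0 then
      splitDigitsLoop fuel (PySem.Int.floordiv curr 10) (res ++ [PySem.Int.mod curr 10])
    else res

def split_digits (n : Int) : List Int := splitDigitsLoop 100 n []

def sum_of_squares (n : Int) : Int :=
  ((split_digits n).map (fun x => x * x)).foldl (· + ·) 0

-- the 'while True' loop of A
def aLoop (fuel : Nat) (d : PySem.Dict Int Int) (cur i : Int) : Int :=
  match fuel with
  | 0 => 0
  | fuel + 1 =>
    let new_res := sum_of_squares cur
    match d.get? new_res with
    | some j => i - j
    | none => aLoop fuel (d.insert new_res i) new_res (i + 1)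

def repeat_sequence_len (n : Int) : Int := aLoop 1000 PySem.Dict.empty n 0

-- ===== PORT B =====
-- B's inner helper f: t accumulates d*d with (m, d) = divmod(m, 10)
def fLoop (fuel : Nat) (m t : Int) : Int :=
  match fuel with
  | 0 => t
  | fuel + 1 =>
    if m > 0 then
      fLoop fuel (PySem.Int.floordiv m 10) (t + PySem.Int.mod m 10 * PySem.Int.mod m 10)
    else t

def fB (m : Int) : Int := fLoop 100 m 0

-- while slow != fast: slow = f(slow); fast = f(f(fast))
def bMeet (fuel : Nat) (slow fast : Int) : Int :=
  match fuel with
  | 0 => slow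
  | fuel + 1 => if slow ≠ fast then bMeet fuel (fB slow) (fB (fB fast)) else slow

-- length = 1; y = f(slow); while y != slow: length += 1; y = f(y)
def bCount (fuel : Nat) (length y slow : Int) : Int :=
  match fuel with
  | 0 => length
  | fuel + 1 => if y ≠ slow then bCount fuel (length + 1) (fB y) slow else length

def repeat_sequence_len_alt (n : Int) : Int :=
  let slow := fB n
  let fast := fB slow
  let m := bMeet 1000 slow fast
  bCount 1000 1 (fB m) m

-- ===== PRECONDITION & SPEC =====
def Spec_repeat_sequence_len (n : Int) (out : Int) : Prop := out = repeat_sequence_len_alt n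
instance (n : Int) (out : Int) : Decidable (Spec_repeat_sequence_len n out) := by unfold Spec_repeat_sequence_len; infer_instance

-- ===== CLAIM (what is proved, stated in full; the proofs are below) =====
def Claim_equal_repeat_sequence_len : Prop := ∀ (n : Int), Dom_repeat_sequence_len n → Spec_repeat_sequence_len n (repeat_sequence_len n)

-- ===== LEMMAS AND PROOFS =====

-- A's result depends on n only through sum_of_squares n (the first loop iteration)
def gA (m : Int) : Int := aLoop 999 (PySem.Dict.empty.insert m 0) m 1
-- B's result depends on n only through fB n
def gB (m : Int) : Int :=
  let fast := fB m
  let mt := bMeet 1000 m fast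
  bCount 1000 1 (fB mt) mt

def sqsum (l : List Int) : Int := (l.map (fun x => x * x)).sum

theorem sqsum_append (l l' : List Int) : sqsum (l ++ l') = sqsum l + sqsum l' := by
  simp [sqsum]

theorem splitDigitsLoop_append (fuel : Nat) :
    ∀ (curr : Int) (res : List Int),
      splitDigitsLoop fuel curr res = res ++ splitDigitsLoop fuel curr [] := by
  induction fuel with
  | zero => intro curr res; simp [splitDigitsLoop]
  | succ fuel ih =>
    intro curr res
    by_cases h : curr > 0
    · simp only [splitDigitsLoop, if_pos h]
      rw [ih _ (res ++ _), ih _ ([] ++ _)]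
      simp
    · simp [splitDigitsLoop, h]

theorem sos_eq_sqsum (n : Int) : sum_of_squares n = sqsum (split_digits n) := by
  have h : ∀ (l : List Int) (a : Int), l.foldl (· + ·) a = a + l.sum := by
    intro l
    induction l with
    | nil => simp
    | cons x xs ih => intro a; simp [List.foldl_cons, ih (a + x), List.sum_cons]; ring
  simp [sum_of_squares, sqsum, h]

theorem fLoop_eq (fuel : Nat) :
    ∀ (m t : Int), fLoop fuel m t = t + sqsum (splitDigitsLoop fuel m []) := by
  induction fuel with
  | zero => intro m t; simp [fLoop, splitDigitsLoop, sqsum]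
  | succ fuel ih =>
    intro m t
    by_cases h : m > 0
    · simp only [fLoop, splitDigitsLoop, if_pos h]
      rw [ih, splitDigitsLoop_append fuel _ ([] ++ _), sqsum_append]
      simp [sqsum]
      ring
    · simp [fLoop, splitDigitsLoop, h, sqsum]

theorem fB_eq_sos (n : Int) : fB n = sum_of_squares n := by
  rw [fB, fLoop_eq, sos_eq_sqsum, split_digits]
  ring

theorem sqsum_loop_bound :
    ∀ (k fuel : Nat) (curr : Int) (res : List Int), k ≤ fuel → curr < 10 ^ k →
      sqsum res ≤ sqsum (splitDigitsLoop fuel curr res) ∧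
      sqsum (splitDigitsLoop fuel curr res) ≤ sqsum res + 81 * k := by
  intro k
  induction k with
  | zero =>
    intro fuel curr res _ hlt
    have h : ¬ curr > 0 := by simp only [pow_zero] at hlt; omega
    cases fuel <;> simp [splitDigitsLoop, h]
  | succ k ih =>
    intro fuel curr res hk hlt
    match fuel, hk with
    | fuel + 1, hk =>
      by_cases h : curr > 0
      · simp only [splitDigitsLoop, if_pos h]
        have hm : 0 ≤ PySem.Int.mod curr 10 ∧ PySem.Int.mod curr 10 ≤ 9 := by
          rw [PySem.Int.mod_eq_emod_of_pos (by norm_num)]; omega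
        have hd : PySem.Int.floordiv curr 10 < 10 ^ k := by
          rw [PySem.Int.floordiv_eq_ediv_of_pos (by norm_num)]
          rw [pow_succ] at hlt
          generalize (10 : Int) ^ k = P at *
          omega
        have := ih fuel (PySem.Int.floordiv curr 10)
          (res ++ [PySem.Int.mod curr 10]) (by omega) hd
        rw [sqsum_append] at this
        have hsq : 0 ≤ PySem.Int.mod curr 10 * PySem.Int.mod curr 10 ∧
            PySem.Int.mod curr 10 * PySem.Int.mod curr 10 ≤ 81 := by
          exact ⟨mul_self_nonneg _, by nlinarith [hm.1, hm.2]⟩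
        have h1 : sqsum [PySem.Int.mod curr 10] = PySem.Int.mod curr 10 * PySem.Int.mod curr 10 := by
          simp [sqsum]
        constructor
        · omega
        · push_cast
          omega
      · simp only [splitDigitsLoop, if_neg h]
        constructor
        · omega
        · have : (0:Int) ≤ 81 * (k + 1 : Nat) := by positivity
          omega

theorem sos_bound (n : Int) (hn : n < 10 ^ 10) :
    0 ≤ sum_of_squares n ∧ sum_of_squares n ≤ 810 := by
  have := sqsum_loop_bound 10 100 n [] (by omega) hn
  rw [sos_eq_sqsum, split_digits]
  have h0 : sqsum ([] : List Int) = 0 := rfl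
  push_cast at this
  omega

set_option maxRecDepth 100000 in
set_option maxHeartbeats 4000000 in
theorem tableB : ((List.range 811).all (fun k => gA (k : Int) == gB (k : Int))) = true := by rfl

theorem table : ∀ k ∈ List.range 811, gA (k : Int) = gB (k : Int) := by
  intro k hk
  have := List.all_eq_true.mp tableB k hk
  exact eq_of_beq this

-- ===== VERDICT (by name: the statement is the Claim_ definition above) =====
theorem repeat_sequence_len_spec : Claim_equal_repeat_sequence_len := by
  intro n hDom
  unfold Spec_repeat_sequence_len
  have hA : repeat_sequence_len n = gA (sum_of_squares n) := rfl
  have hB : repeat_sequence_len_alt n = gB (fB n) := rfl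
  rw [hA, hB, fB_eq_sos]
  have hdom : n ≤ 2147483648 := by
    simp [Dom_repeat_sequence_len, pvDomInt] at hDom; omega
  have hb := sos_bound n (by norm_num; omega)
  have hk : (sum_of_squares n).toNat ∈ List.range 811 := by
    simp [List.mem_range]; omega
  have := table _ hk
  rwa [Int.toNat_of_nonneg hb.1] at this
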